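-- pv_equiv track=rewrite | github.com/spropst4/Decoupling-Gcode | FilamentWidth/image_2_gcode_lattice_cube_GRADIENT.py | setpress
-- ===== SOURCE A (Python) =====
-- def setpress(pressure):
--     # IMPORTS
--     from codecs import encode
--     from textwrap import wrap
--
--     pressure = str(pressure * 10)
--     length = len(pressure)
--     while length < 4:
--         pressure = "0" + pressure
--         length = len(pressure)
--
--     commandc = bytes(('08PS  ' + pressure), "utf-8")
--
--     # FIND CHECKSUM
--     startc = b'\x05\x02'
--     endc = b'\x03'
--
--     hexcommand = encode(commandc, "hex")  # encode should turn this into a hex rather than ascii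
--
--     hexcommand = hexcommand.decode("utf-8")  # decode should turn this into a string object rather than a bytes object
--
--     ####format for arduino#####
--     format_command = str(hexcommand)
--     format_command = '\\x'.join(format_command[i:i + 2] for i in range(0, len(format_command), 2))
--     format_command = '\\x' + format_command
--     ##########################
--
--     hexcommand = wrap(hexcommand,
--                       2)  # wrap should split the string into a horizontal array of strings of 2 characters each
--
--     # GETTING THE 8 BIT 2'S COMPLEMENT
--     decimalsum = 0
--     for i in hexcommand:  # get the decimal sum of the hex command
--         decimalsum = decimalsum + int(i, 16)
--     checksum = decimalsum % 256  # get the remainder of the decimal sum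
--     checksum = bin(checksum)  # turn into binary
--     checksum = checksum[2:]  # checksum is a string
--     while len(checksum) < 8:  # checksum must represents 8 bits of information
--         checksum = "0" + checksum
--     invert = ""
--     for i in checksum:  # binary sum must be inverted
--         if i == '0':
--             invert = invert + "1"
--         else:
--             invert = invert + "0"
--     invert = int(invert, 2)  # binary sum turned into decimal form
--     invert = invert + 1
--     # CHECKSUM HAS BEEN RETRIEVED IN DECIMAL FORM
--     checksum = invert
--     checksum = hex(checksum)  # checksum is in the format "0x##"
--     # CHECKSUM IS NOW IN ASCII FORM, don't be mislead by the hex function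
--     checksum = checksum[2:]
--     checksumarray = []
--     for i in checksum:  # must get alphabetical characters in uppercase for ascii to hex conversion
--         if i.isalpha():
--             i = i.upper()
--             checksumarray.append(i)
--         else:
--             checksumarray.append(i)
--     checksum = ""
--     for i in checksumarray:
--         checksum = checksum + i
--     # checksum is a string.
--     checksum = bytes(checksum, 'ascii')
--
--     ####format for arduino#####
--     hexchecksum = encode(checksum, 'hex')
--     hexchecksum = hexchecksum.decode("utf-8")  # decode should turn this into a string object rather than a bytes object
--     format_checksum = str(hexchecksum)  # format for arduino
--     format_checksum = '\\x'.join(format_checksum[i:i + 2] for i in range(0, len(format_checksum), 2))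
--     format_checksum = '\\x' + format_checksum
--
--     # SENDING OUT THE COMMAND
--     ##format for arduino####
--     finalcommand = ("\\x05\\x02") + format_command + format_checksum + str("\\x03")
--     finalcommand = finalcommand.strip('\r').strip('\n')
--     finalcommand = "b'" + finalcommand + "'"
--     return finalcommand
-- ===== SOURCE B (Python) =====
-- def setpress(pressure):
--     p = str(pressure * 10)
--     while len(p) < 4:
--         p = "0" + p
--     commandc = bytes('08PS  ' + p, 'utf-8')
--     decimalsum = sum(commandc)
--     checksum = 256 - decimalsum % 256
--     cs = format(checksum, 'X')
--     format_command = ''.join('\\x%02x' % b for b in commandc)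
--     format_checksum = ''.join('\\x%02x' % b for b in cs.encode('ascii'))
--     return "b'" + '\\x05\\x02' + format_command + format_checksum + "\\x03" + "'"
-- ===== Notes on version B (the rewrite author's own statement) =====
-- stated objective: simpler
-- what changed: B drops A's hex-encode/wrap/re-parse round trip and the binary-string bit-inversion dance: it sums the raw command bytes directly, computes the 8-bit two's complement arithmetically as 256 - sum % 256, renders it with format(.,'X'), and emits each \xNN escape per byte with '%02x' instead of hex-encoding the whole string and re-joining pairs.
import Mathlib
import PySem

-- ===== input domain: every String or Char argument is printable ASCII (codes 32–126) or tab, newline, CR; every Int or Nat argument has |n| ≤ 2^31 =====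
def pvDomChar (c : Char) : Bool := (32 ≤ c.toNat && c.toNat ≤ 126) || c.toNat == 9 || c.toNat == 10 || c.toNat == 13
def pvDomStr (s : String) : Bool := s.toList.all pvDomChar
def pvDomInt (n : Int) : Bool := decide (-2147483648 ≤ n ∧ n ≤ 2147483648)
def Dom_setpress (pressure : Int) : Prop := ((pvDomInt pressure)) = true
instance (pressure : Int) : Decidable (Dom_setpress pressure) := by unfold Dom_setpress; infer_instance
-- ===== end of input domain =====

-- B replaces A's hex-encode/wrap/re-parse checksum pipeline by the direct byte sum and the
-- arithmetic two's complement 256 - sum % 256 with a direct uppercase-hex rendering (objective: simpler).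

-- ===== shared helpers (both Pythons build the same padded string and use lowercase byte hex) =====

-- the `while length < target: s = "0" + s` padding loop, run with enough fuel
-- (each iteration grows the length by 1, so `target` steps always suffice)
def padLoop (target : Nat) : Nat → List Char → List Char
  | 0, s => s
  | k + 1, s => if s.length < target then padLoop target k ('0' :: s) else s

-- the `while length < 4: pressure = "0" + pressure` loop (identical in A and B)
def padTo4 (s : List Char) : List Char := padLoop 4 4 s

-- one lowercase hex digit (0..15)
def hexDig (n : Nat) : Char := if n < 10 then Char.ofNat (48 + n) else Char.ofNat (87 + n)

-- hex encoding of one byte, two lowercase hex digits; exact for b < 256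
-- (A reaches it through codecs.encode(·,'hex'), B through '%02x')
def byteHex (b : Nat) : List Char := [hexDig ((b / 16) % 16), hexDig (b % 16)]

-- ===== PORT A =====

-- value of one hex digit character (int(·,16) digit); exact on '0'-'9','a'-'f','A'-'F'
def hexVal (c : Char) : Nat :=
  if 97 ≤ c.toNat then c.toNat - 87 else if 65 ≤ c.toNat then c.toNat - 55 else c.toNat - 48

-- int(s, 16) on a hex-digit string
def parseHex16 (l : List Char) : Nat := l.foldl (fun a c => 16 * a + hexVal c) 0

-- int(s, 2) on a binary-digit string
def parseBin (l : List Char) : Nat := l.foldl (fun a c => 2 * a + (c.toNat - 48)) 0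

-- textwrap.wrap(s, 2), and equally A's slice comprehension s[i:i+2] for i in range(0,len,2):
-- successive chunks of 2 characters (exact; a trailing odd character forms a chunk of 1)
def chunks2 : List Char → List (List Char)
  | [] => []
  | [a] => [[a]]
  | a :: b :: rest => [a, b] :: chunks2 rest

-- '\\x'.join(parts)
def joinBS : List (List Char) → List Char
  | [] => []
  | [p] => p
  | p :: rest => p ++ '\\' :: 'x' :: joinBS rest

-- bin(n)[2:] for n ≥ 0 (binary digit characters, bin(0)[2:] = "0")
def binStr (n : Nat) : List Char := Nat.toDigits 2 n

-- the `while len(checksum) < 8: checksum = "0" + checksum` loop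
def padTo8 (s : List Char) : List Char := padLoop 8 8 s

-- hex(n)[2:] for n ≥ 0 (lowercase hex digit characters)
def hexStrLower (n : Nat) : List Char := Nat.toDigits 16 n

-- A's per-character loop: i.upper() if i.isalpha() else i (exact for ASCII)
def upAlpha (c : Char) : Char :=
  if (97 ≤ c.toNat ∧ c.toNat ≤ 122) ∨ (65 ≤ c.toNat ∧ c.toNat ≤ 90) then
    (if 97 ≤ c.toNat ∧ c.toNat ≤ 122 then Char.ofNat (c.toNat - 32) else c)
  else c

def setpress (pressure : Int) : String :=
  let p := padTo4 (PySem.Int.toChars (pressure * 10))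
  let commandc : List Nat := ('0' :: '8' :: 'P' :: 'S' :: ' ' :: ' ' :: p).map Char.toNat
  let hexcommand : List Char := (commandc.map byteHex).flatten      -- codecs.encode(·,'hex')
  let format_command : List Char := '\\' :: 'x' :: joinBS (chunks2 hexcommand)
  let wrapped := chunks2 hexcommand                                 -- textwrap.wrap(·,2)
  let decimalsum := wrapped.foldl (fun a pr => a + parseHex16 pr) 0
  let c1 := decimalsum % 256
  let b8 := padTo8 (binStr c1)
  let inv := b8.foldl (fun acc i => acc ++ [if i = '0' then '1' else '0']) []
  let invn := parseBin inv + 1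
  let csUp := (hexStrLower invn).foldl (fun acc i => acc ++ [upAlpha i]) []
  let csBytes : List Nat := csUp.map Char.toNat                     -- bytes(·,'ascii')
  let hexchecksum := (csBytes.map byteHex).flatten
  let format_checksum : List Char := '\\' :: 'x' :: joinBS (chunks2 hexchecksum)
  -- "\x05\x02" and "\x03" as explicit char lists
  let fc0 := (['\\','x','0','5','\\','x','0','2']) ++ format_command ++ format_checksum ++ (['\\','x','0','3'])
  let fc1 := PySem.Chars.stripChars fc0 ['\r']
  let fc2 := PySem.Chars.stripChars fc1 ['\n']
  String.ofList (['b','\''] ++ fc2 ++ ['\''])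

-- ===== PORT B =====

-- format(n, 'X') for n ≥ 0: uppercase hex digit characters
def hexStrUpper (n : Nat) : List Char := (Nat.toDigits 16 n).map PySem.Chars.upperChar

def setpress_alt (pressure : Int) : String :=
  let p := padTo4 (PySem.Int.toChars (pressure * 10))
  let commandc : List Nat := ('0' :: '8' :: 'P' :: 'S' :: ' ' :: ' ' :: p).map Char.toNat
  let decimalsum := commandc.foldl (· + ·) 0                        -- sum(commandc)
  let checksum := 256 - decimalsum % 256
  let cs := hexStrUpper checksum                                    -- format(checksum,'X')
  let format_command := (commandc.map (fun b => '\\' :: 'x' :: byteHex b)).flatten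
  let format_checksum := ((cs.map Char.toNat).map (fun b => '\\' :: 'x' :: byteHex b)).flatten
  -- "b'\x05\x02" ++ … ++ "\x03'" as explicit char lists
  String.ofList (['b','\'','\\','x','0','5','\\','x','0','2'] ++ format_command ++ format_checksum ++ ['\\','x','0','3','\''])

-- ===== PRECONDITION & SPEC =====
def Spec_setpress (pressure : Int) (out : String) : Prop := out = setpress_alt pressure
instance (pressure : Int) (out : String) : Decidable (Spec_setpress pressure out) := by unfold Spec_setpress; infer_instance

-- ===== CLAIM (what is proved, stated in full; the proofs are below) =====
def Claim_equal_setpress : Prop := ∀ (pressure : Int), Dom_setpress pressure → Spec_setpress pressure (setpress pressure)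

-- ===== LEMMAS AND PROOFS =====

-- each byteHex block has length 2, so chunking the flattened hex string recovers the blocks
theorem chunks2_flatten (bs : List Nat) :
    chunks2 ((bs.map byteHex).flatten) = bs.map byteHex := by
  induction bs with
  | nil => rfl
  | cons b rest ih => simp [byteHex, chunks2, ih]

-- A's "\x"-join of the chunks equals B's per-byte "\x.." concatenation (nonempty byte list)
theorem join_eq_flatten (b : Nat) (bs : List Nat) :
    '\\' :: 'x' :: joinBS (chunks2 (((b :: bs).map byteHex).flatten)) =
      ((b :: bs).map (fun b => '\\' :: 'x' :: byteHex b)).flatten := by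
  rw [chunks2_flatten]
  induction bs generalizing b with
  | nil => rfl
  | cons c rest ih =>
      simp only [List.map_cons, List.flatten_cons] at *
      rw [← ih c]
      simp [joinBS, byteHex]

theorem hexVal_hexDig (d : Nat) (h : d < 16) : hexVal (hexDig d) = d := by
  interval_cases d <;> decide

theorem parseHex16_byteHex (b : Nat) : parseHex16 (byteHex b) = b % 256 := by
  simp only [byteHex, parseHex16, List.foldl]
  rw [hexVal_hexDig _ (Nat.mod_lt _ (by norm_num)), hexVal_hexDig _ (Nat.mod_lt _ (by norm_num))]
  omega

-- A's decimal sum (over re-parsed hex pairs) agrees with B's raw byte sum mod 256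
theorem sum_mod_eq (bs : List Nat) (a₁ a₂ : Nat) (h : a₁ % 256 = a₂ % 256) :
    ((bs.map byteHex).foldl (fun a pr => a + parseHex16 pr) a₁) % 256 =
      (bs.foldl (· + ·) a₂) % 256 := by
  induction bs generalizing a₁ a₂ with
  | nil => simpa using h
  | cons b rest ih =>
      simp only [List.map_cons, List.foldl_cons]
      exact ih _ _ (by rw [parseHex16_byteHex]; omega)

-- A's bin/pad/invert/+1 dance computes the arithmetic two's complement 256 - c
set_option maxRecDepth 8192 in
theorem twos_complement (c : Nat) (h : c < 256) :
    parseBin ((padTo8 (binStr c)).foldl (fun acc i => acc ++ [if i = '0' then '1' else '0']) []) + 1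
      = 256 - c := by
  revert h
  revert c
  decide

-- A's lowercase hex + uppercase loop equals B's uppercase hex
set_option maxRecDepth 8192 in
theorem upAlpha_hexStr (v : Nat) (h : v ≤ 256) :
    (hexStrLower v).foldl (fun acc i => acc ++ [upAlpha i]) [] = hexStrUpper v := by
  revert h; revert v; decide

-- s.strip(c) is the identity when neither end is c
theorem strip_id (c a b : Char) (l : List Char) (ha : a ≠ c) (hb : b ≠ c) :
    PySem.Chars.stripChars (a :: (l ++ [b])) [c] = a :: (l ++ [b]) := by
  simp [PySem.Chars.stripChars, List.dropWhile, ha, hb]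

set_option maxRecDepth 8192 in
theorem hexStrUpper_ne_nil (v : Nat) (h : v ≤ 256) : hexStrUpper v ≠ [] := by
  revert h; revert v; decide

-- the final command never begins or ends with '\r' or '\n', so both strips are the identity
theorem strip_frame (F G : List Char) :
    PySem.Chars.stripChars (PySem.Chars.stripChars
        (['\\','x','0','5','\\','x','0','2'] ++ F ++ G ++ ['\\','x','0','3']) ['\r']) ['\n']
      = ['\\','x','0','5','\\','x','0','2'] ++ F ++ G ++ ['\\','x','0','3'] := by
  have hshape : (['\\','x','0','5','\\','x','0','2'] ++ F ++ G ++ ['\\','x','0','3'] : List Char)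
      = '\\' :: ((['x','0','5','\\','x','0','2'] ++ F ++ G ++ ['\\','x','0']) ++ ['3']) := by
    simp
  rw [hshape, strip_id _ _ _ _ (by decide) (by decide), strip_id _ _ _ _ (by decide) (by decide)]

-- ===== VERDICT (by name: the statement is the Claim_ definition above) =====
theorem setpress_spec : Claim_equal_setpress := by
  unfold Claim_equal_setpress
  intro pressure _
  unfold Spec_setpress
  simp only [setpress, setpress_alt]
  generalize padTo4 (PySem.Int.toChars (pressure * 10)) = p
  rw [List.map_cons]
  generalize ('8' :: 'P' :: 'S' :: ' ' :: ' ' :: p).map Char.toNat = bs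
  rw [join_eq_flatten, chunks2_flatten ('0'.toNat :: bs)]
  rw [sum_mod_eq ('0'.toNat :: bs) 0 0 rfl]
  rw [twos_complement _ (Nat.mod_lt _ (by norm_num))]
  rw [upAlpha_hexStr _ (Nat.sub_le _ _)]
  obtain ⟨u, us, hu⟩ := List.exists_cons_of_ne_nil
    (hexStrUpper_ne_nil (256 - List.foldl (· + ·) 0 ('0'.toNat :: bs) % 256) (Nat.sub_le _ _))
  rw [hu, show List.map Char.toNat (u :: us) = u.toNat :: us.map Char.toNat from rfl]
  rw [join_eq_flatten]
  rw [strip_frame]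
  simp
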